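-- pv_equiv track=rewrite | github.com/waldur/ansible-waldur-module | waldur_os_security_group.py | compare_rules
-- ===== SOURCE A (Python) =====
-- import copy
--
-- def compare_rules(local_rules, remote_rules):
--     remote_rules = remote_rules.copy()
--
--     for local_rule in local_rules:
--         try:
--             tmp_remote_rules = copy.deepcopy(remote_rules)
--
--             for rules in tmp_remote_rules:
--                 if 'remote_group' in local_rule:
--                     if 'cidr' in rules:
--                         rules.pop('cidr')
--                     if 'ethertype' in rules:
--                         rules.pop('ethertype')
--                 else:
--                     if 'remote_group' in rules:
--                         rules.pop('remote_group')
--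
--             remote_rules.pop(tmp_remote_rules.index(local_rule))
--         except ValueError:
--             return False
--
--     if not len(remote_rules):
--         return True
--
--     return False
-- ===== SOURCE B (Python) =====
-- def compare_rules(local_rules, remote_rules):
--     # Index each remote rule once under both normalizations; greedy smallest-index match.
--     keys_rg = []   # canonical form with 'cidr'/'ethertype' dropped (used when local has 'remote_group')
--     keys_no = []   # canonical form with 'remote_group' dropped
--     bucket_rg = {}
--     bucket_no = {}
--     for i, r in enumerate(remote_rules):
--         krg = tuple(sorted(((k, v) for k, v in r.items() if k != 'cidr' and k != 'ethertype'), key=lambda kv: kv[0]))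
--         kno = tuple(sorted(((k, v) for k, v in r.items() if k != 'remote_group'), key=lambda kv: kv[0]))
--         keys_rg.append(krg)
--         keys_no.append(kno)
--         bucket_rg.setdefault(krg, []).append(i)
--         bucket_no.setdefault(kno, []).append(i)
--     remaining = len(remote_rules)
--     for l in local_rules:
--         key = tuple(sorted(l.items(), key=lambda kv: kv[0]))
--         if 'remote_group' in l:
--             lst = bucket_rg.get(key)
--             if not lst:
--                 return False
--             i = lst.pop(0)
--             bucket_no[keys_no[i]].remove(i)
--         else:
--             lst = bucket_no.get(key)
--             if not lst:
--                 return False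
--             i = lst.pop(0)
--             bucket_rg[keys_rg[i]].remove(i)
--         remaining -= 1
--     return remaining == 0
-- ===== Notes on version B (the rewrite author's own statement) =====
-- stated objective: faster
-- what changed: Instead of deep-copying and re-normalizing the whole remote list for every local rule and scanning it with list.index, B normalizes each remote rule once into canonical sorted-item keys for both modes, indexes them in per-mode buckets of ascending indices, and matches each local rule greedily to the smallest still-available index.
import Mathlib
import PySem

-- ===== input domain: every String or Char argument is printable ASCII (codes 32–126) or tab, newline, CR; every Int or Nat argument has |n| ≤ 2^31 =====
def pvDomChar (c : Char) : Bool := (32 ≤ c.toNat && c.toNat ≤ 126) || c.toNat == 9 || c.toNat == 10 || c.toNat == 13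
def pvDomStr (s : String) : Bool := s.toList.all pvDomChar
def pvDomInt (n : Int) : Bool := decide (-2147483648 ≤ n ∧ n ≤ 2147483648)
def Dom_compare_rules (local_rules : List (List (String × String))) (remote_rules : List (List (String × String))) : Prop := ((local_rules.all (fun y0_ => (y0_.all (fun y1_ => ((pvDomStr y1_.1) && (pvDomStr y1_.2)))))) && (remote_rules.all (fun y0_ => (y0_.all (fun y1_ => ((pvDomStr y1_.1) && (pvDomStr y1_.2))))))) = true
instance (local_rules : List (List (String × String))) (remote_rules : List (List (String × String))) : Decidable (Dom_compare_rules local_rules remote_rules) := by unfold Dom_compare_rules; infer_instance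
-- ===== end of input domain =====

-- ===== PORT A =====
-- B replaces A's per-local-rule deepcopy+normalize+scan with one upfront per-mode index of
-- normalized remote rules and greedy smallest-index matching (objective: faster).
-- Inputs are Python dicts; both ports marshal each association list to a dict first
-- (duplicate keys collapse, last value wins, as dict() does).
def pvToDict (r : List (String × String)) : PySem.Dict String String := PySem.Dict.ofList r

-- 'if k in rules: rules.pop(k)'
def pvPopIf (d : PySem.Dict String String) (k : String) : PySem.Dict String String :=
  if d.contains k then d.erase k else d

def pvNormA (hasRG : Bool) (d : PySem.Dict String String) : PySem.Dict String String :=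
  if hasRG then pvPopIf (pvPopIf d "cidr") "ethertype" else pvPopIf d "remote_group"

-- Python dict ==, exact: equal sizes and every key/value pair of one found in the other
-- (dict equality ignores insertion order).
def pvDictEq (a b : PySem.Dict String String) : Bool :=
  a.size == b.size && a.items.all (fun p => b.get? p.1 == some p.2)

def pvLoopA : List (PySem.Dict String String) → List (PySem.Dict String String) → Bool
  | [], remote => remote.length == 0
  | l :: ls, remote =>
    match (remote.map (pvNormA (l.contains "remote_group"))).findIdx? (fun r => pvDictEq r l) with
    | none => false
    | some i => pvLoopA ls (remote.eraseIdx i)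

def compare_rules (local_rules : List (List (String × String))) (remote_rules : List (List (String × String))) : Bool :=
  pvLoopA (local_rules.map pvToDict) (remote_rules.map pvToDict)

-- ===== PORT B =====
-- tuple(sorted(pairs, key=lambda kv: kv[0]))
def pvKey (ps : List (String × String)) : List (String × String) :=
  PySem.List.sorted ps (fun p => p.1)

def pvKRG (d : PySem.Dict String String) : List (String × String) :=
  pvKey (d.items.filter (fun p => !(p.1 == "cidr") && !(p.1 == "ethertype")))

def pvKNO (d : PySem.Dict String String) : List (String × String) :=
  pvKey (d.items.filter (fun p => !(p.1 == "remote_group")))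

-- 'for i, r in enumerate(remote_rules): …' building keys_rg, keys_no, bucket_rg, bucket_no
def pvBuild (rs : List (PySem.Dict String String)) :
    List (List (String × String)) × List (List (String × String)) ×
    PySem.Dict (List (String × String)) (List Nat) × PySem.Dict (List (String × String)) (List Nat) :=
  rs.zipIdx.foldl
    (fun st p =>
      (st.1 ++ [pvKRG p.1], st.2.1 ++ [pvKNO p.1],
       st.2.2.1.modify (pvKRG p.1) [] (· ++ [p.2]), st.2.2.2.modify (pvKNO p.1) [] (· ++ [p.2])))
    ([], [], PySem.Dict.empty, PySem.Dict.empty)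

-- greedy loop; keysRG.getD/keysNO.getD: the index is always in range in Source B
def pvLoopB (keysRG keysNO : List (List (String × String))) :
    List (PySem.Dict String String) → PySem.Dict (List (String × String)) (List Nat) →
    PySem.Dict (List (String × String)) (List Nat) → Nat → Bool
  | [], _, _, remaining => remaining == 0
  | l :: ls, br, bn, remaining =>
    if l.contains "remote_group" then
      match br.getD (pvKey l.items) [] with
      | [] => false
      | i :: rest =>
        pvLoopB keysRG keysNO ls (br.insert (pvKey l.items) rest)
          (bn.modify (keysNO.getD i []) [] (fun lst => lst.erase i)) (remaining - 1)
    else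
      match bn.getD (pvKey l.items) [] with
      | [] => false
      | i :: rest =>
        pvLoopB keysRG keysNO ls (br.modify (keysRG.getD i []) [] (fun lst => lst.erase i))
          (bn.insert (pvKey l.items) rest) (remaining - 1)

def compare_rules_alt (local_rules : List (List (String × String))) (remote_rules : List (List (String × String))) : Bool :=
  let st := pvBuild (remote_rules.map pvToDict)
  pvLoopB st.1 st.2.1 (local_rules.map pvToDict) st.2.2.1 st.2.2.2 remote_rules.length

-- ===== PRECONDITION & SPEC =====
def Spec_compare_rules (local_rules : List (List (String × String))) (remote_rules : List (List (String × String))) (out : Bool) : Prop := out = compare_rules_alt local_rules remote_rules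
instance (local_rules : List (List (String × String))) (remote_rules : List (List (String × String))) (out : Bool) : Decidable (Spec_compare_rules local_rules remote_rules out) := by unfold Spec_compare_rules; infer_instance

-- ===== CLAIM (what is proved, stated in full; the proofs are below) =====
def Claim_equal_compare_rules : Prop := ∀ (local_rules : List (List (String × String))) (remote_rules : List (List (String × String))), Dom_compare_rules local_rules remote_rules → Spec_compare_rules local_rules remote_rules (compare_rules local_rules remote_rules)

-- ===== LEMMAS AND PROOFS =====

-- ghost: A's loop carrying each remaining remote dict together with its original index
def pvLoopI : List (PySem.Dict String String) → List (PySem.Dict String String × Nat) → Bool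
  | [], rem => rem.length == 0
  | l :: ls, rem =>
    match rem.findIdx? (fun p => pvDictEq (pvNormA (l.contains "remote_group") p.1) l) with
    | none => false
    | some j => pvLoopI ls (rem.eraseIdx j)

theorem loopA_eq_loopI (ls : List (PySem.Dict String String)) :
    ∀ (rem : List (PySem.Dict String String × Nat)),
    pvLoopA ls (rem.map Prod.fst) = pvLoopI ls rem := by
  induction ls with
  | nil => intro rem; simp [pvLoopA, pvLoopI]
  | cons l ls ih =>
    intro rem
    simp only [pvLoopA, pvLoopI, List.map_map, List.findIdx?_map]
    have h : ((fun r => pvDictEq r l) ∘ (pvNormA (l.contains "remote_group") ∘ Prod.fst))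
        = (fun p : PySem.Dict String String × Nat => pvDictEq (pvNormA (l.contains "remote_group") p.1) l) := rfl
    rw [h]
    cases hf : rem.findIdx? (fun p => pvDictEq (pvNormA (l.contains "remote_group") p.1) l) with
    | none => rfl
    | some j =>
      dsimp only
      rw [List.eraseIdx_map]
      exact ih _

theorem popIf_items (d : PySem.Dict String String) (k : String) :
    (pvPopIf d k).items = d.items.filter (fun p => !(p.1 == k)) := by
  unfold pvPopIf
  by_cases h : d.contains k
  · simp [h, PySem.Dict.erase]
  · have hcf : d.contains k = false := by simpa using h
    simp only [hcf, Bool.false_eq_true, if_false]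
    rw [eq_comm, List.filter_eq_self]
    intro p hp
    simp only [PySem.Dict.contains, Bool.not_eq_true'] at hcf ⊢
    by_contra hc
    simp only [Bool.not_eq_false] at hc
    have : (d.items.any fun p => p.1 == k) = true := List.any_eq_true.mpr ⟨p, hp, hc⟩
    rw [hcf] at this; exact Bool.false_ne_true this

theorem items_normA (h : Bool) (d : PySem.Dict String String) :
    (pvNormA h d).items = d.items.filter
      (fun p => if h then !(p.1 == "cidr") && !(p.1 == "ethertype") else !(p.1 == "remote_group")) := by
  cases h with
  | true =>
    simp only [pvNormA, popIf_items, List.filter_filter, if_pos]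
    exact List.filter_congr (fun p _ => by rw [Bool.and_comm])
  | false =>
    simp only [pvNormA, Bool.false_eq_true, if_false, popIf_items]

theorem keys_nodup_normA (h : Bool) (d : PySem.Dict String String) (hd : d.keys.Nodup) :
    (pvNormA h d).keys.Nodup := by
  have : (pvNormA h d).items.Sublist d.items := by
    rw [items_normA]; exact List.filter_sublist
  exact List.Sublist.nodup (List.Sublist.map _ this) hd

-- the key-sorted item list of a key-nodup dict is canonical for its permutation class
theorem pvKey_eq_of_perm (xs ys : List (String × String))
    (hp : xs.Perm ys) (hy : (ys.map Prod.fst).Nodup) : pvKey xs = pvKey ys := by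
  unfold pvKey
  apply PySem.List.sorted_eq_of_perm_of_pairwise_lt
  · exact (PySem.List.sorted_perm ys (fun p => p.1) false).trans hp.symm
  · have h1 : List.Pairwise (fun a b : String × String => a.1 ≤ b.1) (pvKey ys) :=
      PySem.List.sorted_pairwise ys (fun p => p.1)
    have h2 : ((pvKey ys).map Prod.fst).Nodup :=
      (((PySem.List.sorted_perm ys (fun p => p.1) false).map Prod.fst).nodup_iff).mpr hy
    have h3 : List.Pairwise (fun a b : String × String => a.1 ≠ b.1) (pvKey ys) :=
      List.pairwise_map.mp h2
    exact (h1.and h3).imp (fun h => lt_of_le_of_ne h.1 h.2)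

theorem perm_of_pvKey_eq (xs ys : List (String × String)) (h : pvKey xs = pvKey ys) :
    xs.Perm ys := by
  unfold pvKey at h
  exact (PySem.List.sorted_perm xs (fun p => p.1) false).symm.trans
    (h ▸ PySem.List.sorted_perm ys (fun p => p.1) false)

-- Python dict == is equality of the key-sorted item lists (keys unique on both sides)
theorem dictEq_eq_key (a b : PySem.Dict String String)
    (ha : a.keys.Nodup) (hb : b.keys.Nodup) :
    pvDictEq a b = (pvKey a.items == pvKey b.items) := by
  have hia : a.items.Nodup := List.Nodup.of_map Prod.fst ha
  rw [Bool.eq_iff_iff, beq_iff_eq]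
  constructor
  · intro h
    have h' := h
    unfold pvDictEq at h'
    rw [Bool.and_eq_true, beq_iff_eq] at h'
    obtain ⟨hlen, hall⟩ := h'
    have hsub : a.items ⊆ b.items := by
      intro p hp
      have := List.all_eq_true.mp hall p hp
      rw [beq_iff_eq] at this
      exact ((PySem.Dict.get?_eq_some_iff_mem_items b p.1 p.2 hb).mp this)
    have hperm : a.items.Perm b.items :=
      (hia.subperm hsub).perm_of_length_le (le_of_eq hlen.symm)
    exact pvKey_eq_of_perm _ _ hperm hb
  · intro h
    have hperm : a.items.Perm b.items := perm_of_pvKey_eq _ _ h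
    unfold pvDictEq
    rw [Bool.and_eq_true, beq_iff_eq]
    refine ⟨hperm.length_eq, List.all_eq_true.mpr ?_⟩
    intro p hp
    rw [beq_iff_eq]
    exact (PySem.Dict.get?_eq_some_iff_mem_items b p.1 p.2 hb).mpr (hperm.mem_iff.mp hp)

-- A's comparison of a normalized remote rule with a local rule IS B's key comparison
theorem pred_eq_key (hrg : Bool) (d l : PySem.Dict String String)
    (hd : d.keys.Nodup) (hl : l.keys.Nodup) :
    pvDictEq (pvNormA hrg d) l = ((if hrg then pvKRG d else pvKNO d) == pvKey l.items) := by
  rw [dictEq_eq_key _ _ (keys_nodup_normA hrg d hd) hl, items_normA]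
  cases hrg with
  | true => rfl
  | false => rfl

theorem buildGo_split (L : List (PySem.Dict String String × Nat)) :
    ∀ (s1 s2 : List (List (String × String)))
      (d1 d2 : PySem.Dict (List (String × String)) (List Nat)),
    L.foldl (fun st p =>
      (st.1 ++ [pvKRG p.1], st.2.1 ++ [pvKNO p.1],
       st.2.2.1.modify (pvKRG p.1) [] (· ++ [p.2]), st.2.2.2.modify (pvKNO p.1) [] (· ++ [p.2])))
      (s1, s2, d1, d2)
    = (s1 ++ L.map (fun p => pvKRG p.1), s2 ++ L.map (fun p => pvKNO p.1),
       L.foldl (fun d p => d.modify (pvKRG p.1) [] (· ++ [p.2])) d1,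
       L.foldl (fun d p => d.modify (pvKNO p.1) [] (· ++ [p.2])) d2) := by
  induction L with
  | nil => intro s1 s2 d1 d2; simp
  | cons x L ih =>
    intro s1 s2 d1 d2
    simp only [List.foldl_cons, List.map_cons]
    rw [ih]
    simp

theorem getD_modify_fold (L : List (PySem.Dict String String × Nat))
    (K : List (String × String)) (f : PySem.Dict String String → List (String × String)) :
    (L.foldl (fun d p => d.modify (f p.1) [] (· ++ [p.2])) PySem.Dict.empty).getD K []
      = (L.filter (fun p => f p.1 == K)).map Prod.snd := by
  rw [← List.foldl_map (f := fun p : PySem.Dict String String × Nat => (f p.1, p.2))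
    (g := fun (d : PySem.Dict (List (String × String)) (List Nat)) q => d.modify q.1 [] (· ++ [q.2]))]
  rw [PySem.Dict.getD_foldl_modify_append]
  simp [List.filter_map, List.map_map, Function.comp_def]

theorem build_spec (rs : List (PySem.Dict String String)) :
    (pvBuild rs).1 = rs.map pvKRG ∧ (pvBuild rs).2.1 = rs.map pvKNO ∧
    (∀ K, ((pvBuild rs).2.2.1.getD K []) = (rs.zipIdx.filter (fun p => pvKRG p.1 == K)).map Prod.snd) ∧
    (∀ K, ((pvBuild rs).2.2.2.getD K []) = (rs.zipIdx.filter (fun p => pvKNO p.1 == K)).map Prod.snd) := by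
  unfold pvBuild
  rw [buildGo_split]
  refine ⟨?_, ?_, ?_, ?_⟩
  · show rs.zipIdx.map (fun p => pvKRG p.1) = _
    rw [show (fun p : PySem.Dict String String × Nat => pvKRG p.1) = pvKRG ∘ Prod.fst from rfl,
      ← List.map_map, List.zipIdx_map_fst]
  · show rs.zipIdx.map (fun p => pvKNO p.1) = _
    rw [show (fun p : PySem.Dict String String × Nat => pvKNO p.1) = pvKNO ∘ Prod.fst from rfl,
      ← List.map_map, List.zipIdx_map_fst]
  · intro K; exact getD_modify_fold _ _ _
  · intro K; exact getD_modify_fold _ _ _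

theorem findIdx?_congr_mem {α : Type} (p q : α → Bool) :
    ∀ (l : List α), (∀ x ∈ l, p x = q x) → l.findIdx? p = l.findIdx? q := by
  intro l
  induction l with
  | nil => intro _; rfl
  | cons a l ih =>
    intro h
    rw [List.findIdx?_cons, List.findIdx?_cons, h a (List.mem_cons_self),
      ih (fun x hx => h x (List.mem_cons_of_mem a hx))]

theorem findIdx?_decomp {α : Type} (q : α → Bool) :
    ∀ (l : List α) (j : Nat), l.findIdx? q = some j →
    ∃ pre x suf, l = pre ++ x :: suf ∧ pre.length = j ∧ q x = true ∧ (∀ y ∈ pre, q y = false) := by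
  intro l
  induction l with
  | nil => intro j h; simp at h
  | cons a l ih =>
    intro j h
    rw [List.findIdx?_cons] at h
    by_cases ha : q a
    · rw [if_pos ha] at h
      exact ⟨[], a, l, rfl, by simpa using h, ha, by simp⟩
    · rw [if_neg ha] at h
      obtain ⟨j', hj', rfl⟩ : ∃ j', l.findIdx? q = some j' ∧ j' + 1 = j := by
        cases hf : l.findIdx? q with
        | none => rw [hf] at h; simp at h
        | some j' => rw [hf] at h; exact ⟨j', rfl, by simpa using h⟩
      obtain ⟨pre, x, suf, rfl, hlen, hx, hpre⟩ := ih j' hj'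
      refine ⟨a :: pre, x, suf, rfl, by simp [hlen], hx, ?_⟩
      intro y hy
      rcases List.mem_cons.mp hy with rfl | hy'
      · simpa using ha
      · exact hpre y hy'

theorem eraseIdx_append_cons {α : Type} (pre suf : List α) (x : α) :
    (pre ++ x :: suf).eraseIdx pre.length = pre ++ suf := by
  induction pre with
  | nil => rfl
  | cons a pre ih => simpa using ih

-- one greedy step: first scan-match in rem = head of the matching bucket, and both
-- bucket updates preserve the bucket/remaining-list correspondence
theorem pvStep {α κ : Type} [BEq κ] [LawfulBEq κ]
    (f g : α → κ) (kg : List κ) (dK : κ)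
    (rem : List (α × Nat)) (bf bg : PySem.Dict κ (List Nat)) (Kl : κ)
    (h1 : ∀ K, bf.getD K [] = (rem.filter (fun p => f p.1 == K)).map Prod.snd)
    (h2 : ∀ K, bg.getD K [] = (rem.filter (fun p => g p.1 == K)).map Prod.snd)
    (h4 : (rem.map Prod.snd).Nodup)
    (h5 : ∀ p ∈ rem, kg.getD p.2 dK = g p.1) :
    (rem.findIdx? (fun p => f p.1 == Kl) = none → bf.getD Kl [] = []) ∧
    ∀ j, rem.findIdx? (fun p => f p.1 == Kl) = some j →
    ∃ i rest, bf.getD Kl [] = i :: rest ∧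
      (∀ K, (bf.insert Kl rest).getD K [] = ((rem.eraseIdx j).filter (fun p => f p.1 == K)).map Prod.snd) ∧
      (∀ K, (bg.modify (kg.getD i dK) [] (fun lst => lst.erase i)).getD K []
          = ((rem.eraseIdx j).filter (fun p => g p.1 == K)).map Prod.snd) ∧
      rem.length = (rem.eraseIdx j).length + 1 := by
  constructor
  · intro hnone
    rw [h1 Kl, List.filter_eq_nil_iff.mpr, List.map_nil]
    exact fun a ha => by simpa using List.findIdx?_eq_none_iff.mp hnone a ha
  · intro j hj
    obtain ⟨pre, x, suf, rfl, hlen, hx, hpre⟩ := findIdx?_decomp _ _ _ hj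
    have hfx : f x.1 = Kl := by simpa using hx
    have hpreKl : pre.filter (fun p => f p.1 == Kl) = [] :=
      List.filter_eq_nil_iff.mpr (fun a ha => by simpa using hpre a ha)
    have herase : (pre ++ x :: suf).eraseIdx j = pre ++ suf := by
      rw [← hlen]; exact eraseIdx_append_cons pre suf x
    have hbKl : bf.getD Kl [] = x.2 :: (suf.filter (fun p => f p.1 == Kl)).map Prod.snd := by
      rw [h1 Kl, List.filter_append, hpreKl,
        List.filter_cons_of_pos (p := fun q : α × Nat => f q.1 == Kl) hx]
      simp
    refine ⟨x.2, (suf.filter (fun p => f p.1 == Kl)).map Prod.snd, hbKl, ?_, ?_, ?_⟩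
    · intro K
      by_cases hK : K = Kl
      · subst hK
        rw [PySem.Dict.getD_insert_self, herase, List.filter_append, hpreKl]
        simp
      · rw [PySem.Dict.getD_insert_of_ne _ _ _ hK, h1 K, herase]
        rw [List.filter_append, List.filter_append,
          List.filter_cons_of_neg (p := fun q : α × Nat => f q.1 == K)
            (by show ¬(f x.1 == K) = true; rw [hfx]; exact fun hc => hK (beq_iff_eq.mp hc).symm)]
    · intro K
      have hkg : kg.getD x.2 dK = g x.1 := h5 x (by simp)
      rw [hkg]
      have hx2pre : x.2 ∉ (pre.filter (fun p => g p.1 == g x.1)).map Prod.snd := by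
        intro hmem
        have hmem' : x.2 ∈ pre.map Prod.snd := by
          obtain ⟨q, hq, hq2⟩ := List.mem_map.mp hmem
          exact List.mem_map.mpr ⟨q, List.mem_of_mem_filter hq, hq2⟩
        have hnd := h4
        rw [List.map_append, List.map_cons, List.nodup_append] at hnd
        exact (hnd.2.2 x.2 hmem' x.2 List.mem_cons_self) rfl
      by_cases hK : K = g x.1
      · subst hK
        rw [PySem.Dict.getD_modify_self, h2, herase]
        rw [List.filter_append, List.filter_cons_of_pos (p := fun q : α × Nat => g q.1 == g x.1) (by simp),
          List.map_append, List.map_cons, List.erase_append_right _ hx2pre, List.erase_cons_head,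
          List.filter_append, List.map_append]
      · rw [PySem.Dict.getD_modify_of_ne _ _ _ hK, h2 K, herase]
        rw [List.filter_append, List.filter_append,
          List.filter_cons_of_neg (p := fun q : α × Nat => g q.1 == K)
            (by show ¬(g x.1 == K) = true; exact fun hc => hK (beq_iff_eq.mp hc).symm)]
    · rw [herase]; simp; omega

-- the heart: greedy bucket loop simulates A's scan-and-remove loop
theorem loopI_eq_loopB (kr kn : List (List (String × String)))
    (ls : List (PySem.Dict String String)) :
    ∀ (rem : List (PySem.Dict String String × Nat))
      (br bn : PySem.Dict (List (String × String)) (List Nat)) (remaining : Nat),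
    (∀ K, br.getD K [] = (rem.filter (fun p => pvKRG p.1 == K)).map Prod.snd) →
    (∀ K, bn.getD K [] = (rem.filter (fun p => pvKNO p.1 == K)).map Prod.snd) →
    remaining = rem.length →
    (rem.map Prod.snd).Nodup →
    (∀ p ∈ rem, kr.getD p.2 [] = pvKRG p.1 ∧ kn.getD p.2 [] = pvKNO p.1) →
    (∀ p ∈ rem, p.1.keys.Nodup) →
    (∀ l ∈ ls, l.keys.Nodup) →
    pvLoopI ls rem = pvLoopB kr kn ls br bn remaining := by
  induction ls with
  | nil =>
    intro rem br bn remaining h1 h2 h3 h4 h5 h6 h7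
    simp [pvLoopI, pvLoopB, h3]
  | cons l ls ih =>
    intro rem br bn remaining h1 h2 h3 h4 h5 h6 h7
    have hl : l.keys.Nodup := h7 l List.mem_cons_self
    have hsub : ∀ (j : Nat),
        ((rem.eraseIdx j).map Prod.snd).Nodup ∧
        (∀ p ∈ rem.eraseIdx j, kr.getD p.2 [] = pvKRG p.1 ∧ kn.getD p.2 [] = pvKNO p.1) ∧
        (∀ p ∈ rem.eraseIdx j, p.1.keys.Nodup) := by
      intro j
      have hs := List.eraseIdx_sublist rem j
      exact ⟨(hs.map Prod.snd).nodup h4, fun p hp => h5 p (hs.mem hp), fun p hp => h6 p (hs.mem hp)⟩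
    have hcong : rem.findIdx? (fun p => pvDictEq (pvNormA (l.contains "remote_group") p.1) l)
        = rem.findIdx? (fun p =>
            (if l.contains "remote_group" then pvKRG p.1 else pvKNO p.1) == pvKey l.items) :=
      findIdx?_congr_mem _ _ rem
        (fun p hp => pred_eq_key (l.contains "remote_group") p.1 l (h6 p hp) hl)
    show pvLoopI (l :: ls) rem = _
    unfold pvLoopI
    rw [hcong]
    cases hrg : l.contains "remote_group" with
    | true =>
      simp only [if_true]
      obtain ⟨hnone, hsome⟩ :=
        pvStep pvKRG pvKNO kn [] rem br bn (pvKey l.items) h1 h2 h4 (fun p hp => (h5 p hp).2)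
      cases hf : rem.findIdx? (fun p => pvKRG p.1 == pvKey l.items) with
      | none =>
        unfold pvLoopB
        rw [hrg, if_pos rfl, hnone hf]
      | some j =>
        obtain ⟨i, rest, hb, hinv1, hinv2, hlen⟩ := hsome j hf
        unfold pvLoopB
        rw [hrg, if_pos rfl, hb]
        dsimp only
        obtain ⟨h4', h5', h6'⟩ := hsub j
        exact ih _ _ _ _ hinv1 hinv2 (by omega) h4' h5' h6'
          (fun x hx => h7 x (List.mem_cons_of_mem l hx))
    | false =>
      simp only [Bool.false_eq_true, if_false]
      obtain ⟨hnone, hsome⟩ :=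
        pvStep pvKNO pvKRG kr [] rem bn br (pvKey l.items) h2 h1 h4 (fun p hp => (h5 p hp).1)
      cases hf : rem.findIdx? (fun p => pvKNO p.1 == pvKey l.items) with
      | none =>
        unfold pvLoopB
        rw [hrg, if_neg (by simp), hnone hf]
      | some j =>
        obtain ⟨i, rest, hb, hinv1, hinv2, hlen⟩ := hsome j hf
        unfold pvLoopB
        rw [hrg, if_neg (by simp), hb]
        dsimp only
        obtain ⟨h4', h5', h6'⟩ := hsub j
        exact ih _ _ _ _ hinv2 hinv1 (by omega) h4' h5' h6'
          (fun x hx => h7 x (List.mem_cons_of_mem l hx))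

-- ===== VERDICT (by name: the statement is the Claim_ definition above) =====
theorem compare_rules_spec : Claim_equal_compare_rules := by
  intro lr rr _hdom
  show compare_rules lr rr = compare_rules_alt lr rr
  unfold compare_rules compare_rules_alt
  obtain ⟨hb1, hb2, hb3, hb4⟩ := build_spec (rr.map pvToDict)
  show pvLoopA (lr.map pvToDict) (rr.map pvToDict)
      = pvLoopB (pvBuild (rr.map pvToDict)).1 (pvBuild (rr.map pvToDict)).2.1
          (lr.map pvToDict) (pvBuild (rr.map pvToDict)).2.2.1 (pvBuild (rr.map pvToDict)).2.2.2 rr.length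
  rw [hb1, hb2]
  have hA : pvLoopA (lr.map pvToDict) (rr.map pvToDict)
      = pvLoopI (lr.map pvToDict) ((rr.map pvToDict).zipIdx) := by
    conv_lhs => rw [← List.zipIdx_map_fst 0 (rr.map pvToDict)]
    exact loopA_eq_loopI _ _
  rw [hA]
  apply loopI_eq_loopB
  · exact hb3
  · exact hb4
  · simp
  · rw [List.zipIdx_map_snd]; exact List.nodup_range'
  · intro p hp
    have hget : (rr.map pvToDict)[p.2]? = some p.1 := List.mem_zipIdx_iff_getElem?.mp hp
    constructor
    · rw [List.getD_eq_getElem?_getD, List.getElem?_map, hget]; rfl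
    · rw [List.getD_eq_getElem?_getD, List.getElem?_map, hget]; rfl
  · intro p hp
    have hget : (rr.map pvToDict)[p.2]? = some p.1 := List.mem_zipIdx_iff_getElem?.mp hp
    have : p.1 ∈ rr.map pvToDict := List.mem_of_getElem? hget
    obtain ⟨r, -, hr⟩ := List.mem_map.mp this
    rw [← hr]
    exact PySem.Dict.nodup_keys_ofList r
  · intro l hlm
    obtain ⟨r, -, hr⟩ := List.mem_map.mp hlm
    rw [← hr]
    exact PySem.Dict.nodup_keys_ofList r
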